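-- pv_equiv track=rewrite | github.com/manpreet88/polymer | Property_Prediction.py | find_property_columns
-- ===== SOURCE A (Python) =====
-- REQUESTED_PROPERTIES = [
--     "density",
--     "glass transition",
--     "melting",
--     "specific volume",
--     "thermal decomposition"
-- ]
--
-- def find_property_columns(columns):
--     lowered = {c.lower(): c for c in columns}
--     found = {}
--     for req in REQUESTED_PROPERTIES:
--         match = None
--         for c_low, c_orig in lowered.items():
--             if req in c_low:
--                 match = c_orig
--                 break
--         found[req] = match
--     return found
-- ===== SOURCE B (Python) =====
-- REQUESTED_PROPERTIES = [
--     "density",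
--     "glass transition",
--     "melting",
--     "specific volume",
--     "thermal decomposition"
-- ]
--
-- def find_property_columns(columns):
--     lowered = {c.lower(): c for c in columns}
--     # stage 1: collect ALL (property, column) match pairs in one comprehension
--     pairs = [(req, orig)
--              for low, orig in lowered.items()
--              for req in REQUESTED_PROPERTIES
--              if req in low]
--     # stage 2: dict(reversed(...)) keeps the FIRST match for each property
--     first = dict(reversed(pairs))
--     return {req: first.get(req) for req in REQUESTED_PROPERTIES}
-- ===== Notes on version B (the rewrite author's own statement) =====
-- stated objective: alternative
-- what changed: A does a per-property scan of the lowered columns with an early break; B instead collects ALL (property, column) match pairs in one flat comprehension, reduces them with dict(reversed(pairs)) so the first match per property survives, and reads the answers back with .get.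
import Mathlib
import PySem

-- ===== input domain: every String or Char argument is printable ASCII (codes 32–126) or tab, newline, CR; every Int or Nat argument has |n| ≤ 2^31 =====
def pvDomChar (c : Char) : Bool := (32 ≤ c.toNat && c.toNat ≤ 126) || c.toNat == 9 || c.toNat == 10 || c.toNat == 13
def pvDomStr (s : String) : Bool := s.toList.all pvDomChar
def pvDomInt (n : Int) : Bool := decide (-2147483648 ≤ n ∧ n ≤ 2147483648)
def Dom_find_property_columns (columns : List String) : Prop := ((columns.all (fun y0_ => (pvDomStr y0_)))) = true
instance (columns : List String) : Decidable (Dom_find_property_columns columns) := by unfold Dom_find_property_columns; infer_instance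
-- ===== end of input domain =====

-- B replaces A's per-property scans (early break) by collect-all-match-pairs + dict(reversed(pairs)) + lookups; alternative decomposition, same cost.

-- ===== PORT A =====
def REQUESTED_PROPERTIES : List String :=
  ["density", "glass transition", "melting", "specific volume", "thermal decomposition"]

-- inner 'for c_low, c_orig in lowered.items(): if req in c_low: match = c_orig; break'
def pvInnerScan (req : String) : List (String × String) → Option String
  | [] => none
  | (c_low, c_orig) :: rest =>
      if PySem.Str.isIn req c_low then some c_orig else pvInnerScan req rest

def find_property_columns (columns : List String) : List (String × Option String) :=
  let lowered := columns.foldl (fun d c => d.insert (PySem.Str.lower c) c) PySem.Dict.empty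
  let found := REQUESTED_PROPERTIES.foldl
    (fun f req => f.insert req (pvInnerScan req lowered.items)) PySem.Dict.empty
  found.items

-- ===== PORT B =====
-- 'pairs = [(req, orig) for low, orig in lowered.items() for req in REQUESTED_PROPERTIES if req in low]'
def pvPairs (L : List (String × String)) : List (String × String) :=
  L.flatMap (fun p =>
    (REQUESTED_PROPERTIES.filter (fun req => PySem.Str.isIn req p.1)).map (fun req => (req, p.2)))

def find_property_columns_alt (columns : List String) : List (String × Option String) :=
  let lowered := columns.foldl (fun d c => d.insert (PySem.Str.lower c) c) PySem.Dict.empty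
  let pairs := pvPairs lowered.items
  -- 'first = dict(reversed(pairs))'
  let first := pairs.reverse.foldl (fun d p => d.insert p.1 p.2) PySem.Dict.empty
  -- '{req: first.get(req) for req in REQUESTED_PROPERTIES}'
  let found := REQUESTED_PROPERTIES.foldl
    (fun f req => f.insert req (first.get? req)) PySem.Dict.empty
  found.items

-- ===== PRECONDITION & SPEC =====
def Spec_find_property_columns (columns : List String) (out : List (String × Option String)) : Prop := out = find_property_columns_alt columns
instance (columns : List String) (out : List (String × Option String)) : Decidable (Spec_find_property_columns columns out) := by unfold Spec_find_property_columns; infer_instance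

-- ===== CLAIM (what is proved, stated in full; the proofs are below) =====
def Claim_equal_find_property_columns : Prop := ∀ (columns : List String), Dom_find_property_columns columns → Spec_find_property_columns columns (find_property_columns columns)

-- ===== LEMMAS AND PROOFS =====

-- the final dict comprehension over the five distinct property keys, for any value function g
lemma pvFoldProps (g : String → Option String) :
    (REQUESTED_PROPERTIES.foldl
        (fun f req => f.insert req (g req)) PySem.Dict.empty).items =
      [("density", g "density"), ("glass transition", g "glass transition"),
       ("melting", g "melting"), ("specific volume", g "specific volume"),
       ("thermal decomposition", g "thermal decomposition")] := by
  simp [REQUESTED_PROPERTIES, PySem.Dict.empty, PySem.Dict.insert]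

-- lookup in a dict built by inserting a reversed pair list = first association in the list
lemma pvLookRev (P : List (String × String)) (d : PySem.Dict String String) (k : String) :
    (P.reverse.foldl (fun d p => d.insert p.1 p.2) d).get? k =
      ((P.find? (fun q => q.1 == k)).map Prod.snd).or (d.get? k) := by
  induction P generalizing d with
  | nil => simp
  | cons p rest ih =>
      rw [List.reverse_cons, List.foldl_append]
      simp only [List.foldl_cons, List.foldl_nil, List.find?]
      rw [PySem.Dict.get?_insert]
      by_cases h : k = p.1
      · simp [h]
      · have hb : (p.1 == k) = false := beq_eq_false_iff_ne.mpr (Ne.symm h)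
        rw [if_neg h, ih, hb]

lemma pvFindConst (l : List String) (req : String) :
    l.find? (fun r => r == req) = if req ∈ l then some req else none := by
  induction l with
  | nil => simp
  | cons x xs ih =>
      by_cases h : x = req
      · simp [List.find?, h]
      · rw [List.find?]
        have hb : (x == req) = false := by simp [h]
        rw [hb]
        simp only [ih, List.mem_cons]
        by_cases hm : req ∈ xs <;> simp [hm, Ne.symm h]

-- first match for req in the flat pair list = A's inner scan
lemma pvFindPairs (req : String) (hreq : req ∈ REQUESTED_PROPERTIES)
    (L : List (String × String)) :
    ((pvPairs L).find? (fun q => q.1 == req)).map Prod.snd = pvInnerScan req L := by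
  induction L with
  | nil => simp [pvPairs, pvInnerScan]
  | cons p rest ih =>
      obtain ⟨cl, co⟩ := p
      rw [pvPairs, List.flatMap_cons, List.find?_append, ← pvPairs]
      have hblock :
          (((REQUESTED_PROPERTIES.filter (fun r => PySem.Str.isIn r cl)).map
              (fun r => (r, co))).find? (fun q => q.1 == req)) =
            if PySem.Str.isIn req cl then some (req, co) else none := by
        rw [List.find?_map]
        have : ((fun q => q.1 == req) ∘ fun r => ((r, co) : String × String)) =
            (fun r => r == req) := rfl
        rw [this, pvFindConst]
        simp [List.mem_filter, hreq, PySem.Str.isIn]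
      rw [hblock, pvInnerScan]
      by_cases h : PySem.Str.isIn req cl = true
      · simp [PySem.Str.isIn] at h
        simp [h]
      · simp [PySem.Str.isIn] at h
        simp [h, ih]

lemma pvFirstGet (req : String) (hreq : req ∈ REQUESTED_PROPERTIES)
    (L : List (String × String)) :
    ((pvPairs L).reverse.foldl (fun d p => d.insert p.1 p.2) PySem.Dict.empty).get? req =
      pvInnerScan req L := by
  rw [pvLookRev, PySem.Dict.get?_empty, Option.or_none, pvFindPairs req hreq]

-- ===== VERDICT (by name: the statement is the Claim_ definition above) =====
theorem find_property_columns_spec : Claim_equal_find_property_columns := by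
  intro columns _
  show _ = _
  unfold find_property_columns find_property_columns_alt
  rw [pvFoldProps, pvFoldProps]
  have h := fun req hreq => pvFirstGet req hreq
      ((columns.foldl (fun d c => d.insert (PySem.Str.lower c) c) PySem.Dict.empty).items)
  rw [h "density" (by decide), h "glass transition" (by decide), h "melting" (by decide),
     h "specific volume" (by decide), h "thermal decomposition" (by decide)]
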